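-- pv_equiv track=rewrite | github.com/emanuelbesliu/homeassistant-erovinieta | custom_components/erovinieta/captcha_ocr.py | _has_dot_above
-- ===== SOURCE A (Python) =====
-- def _has_dot_above(
--     w: int, h: int, binary: list[int], x_start: int, x_end: int
-- ) -> bool:
--     """Detect whether a character has a dot separated from its main stroke.
--
--     Scans the original (pre-normalization) binary image within the character's
--     column range top-to-bottom, looking for the pattern:
--         black rows → gap (≥2 consecutive all-white rows) → black rows
--
--     If such a gap is found in the upper portion of the character, it indicates
--     an 'i' (dot + stroke) rather than an 'l' (stroke only).
--     """
--     # Find the tight vertical bounding box for this character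
--     y_min, y_max = h, 0
--     for y in range(h):
--         for x in range(x_start, x_end):
--             if binary[y * w + x]:
--                 y_min = min(y_min, y)
--                 y_max = max(y_max, y + 1)
--                 break
--
--     if y_min >= y_max:
--         return False
--
--     char_h = y_max - y_min
--
--     # Scan rows within bounding box, checking if each row has any black pixel
--     row_has_ink = []
--     for y in range(y_min, y_max):
--         has_ink = any(binary[y * w + x] for x in range(x_start, x_end))
--         row_has_ink.append(has_ink)
--
--     # Look for pattern: ink → gap (≥2 white rows) → ink, in upper 60%
--     upper_limit = int(char_h * 0.6)
--     in_ink = False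
--     gap_count = 0
--     found_first_ink = False
--
--     for i in range(min(upper_limit, len(row_has_ink))):
--         if row_has_ink[i]:
--             if found_first_ink and gap_count >= 2:
--                 # Found ink, then gap, then ink again → dot above stroke
--                 return True
--             in_ink = True
--             found_first_ink = True
--             gap_count = 0
--         else:
--             if in_ink:
--                 # Transitioned from ink to white
--                 gap_count += 1
--             elif found_first_ink:
--                 gap_count += 1
--
--     return False
-- ===== SOURCE B (Python) =====
-- def _has_dot_above(
--     w: int, h: int, binary: list[int], x_start: int, x_end: int
-- ) -> bool:
--     """Detect a dot separated from the main stroke (an 'i' rather than an 'l').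
--
--     One pass builds the list of row indices that contain ink in the column
--     range; the bounding box falls out of its first/last entries, and the
--     dot-gap pattern is just two consecutive ink rows, both in the upper 60%
--     of the box, that are >= 3 rows apart (>= 2 all-white rows between them).
--     """
--     inked = [
--         y
--         for y in range(h)
--         if any(binary[y * w + x] for x in range(x_start, x_end))
--     ]
--     if not inked:
--         return False
--     y_min, y_max = inked[0], inked[-1] + 1
--     limit = y_min + (y_max - y_min) * 6 // 10  # upper 60% of the bounding box
--     upper = [y for y in inked if y < limit]
--     return any(b - a >= 3 for a, b in zip(upper, upper[1:]))
-- ===== Notes on version B (the rewrite author's own statement) =====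
-- stated objective: simpler
-- what changed: B replaces A's three passes (bounding-box fold, row-ink list build, ink/gap flag state machine) by one ink-row index list from which the bounding box is read off and the gap pattern becomes 'two consecutive ink rows in the upper 60% that are >= 3 apart'.
-- outside the precondition, e.g. on _has_dot_above(1, -7, [1, 0, 0, 1, 0, 0, 0], 0, 1): A returns True, B returns False; on _has_dot_above(3, 1, [1, 0], 0, 3): A returns False, B returns False
import Mathlib
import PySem

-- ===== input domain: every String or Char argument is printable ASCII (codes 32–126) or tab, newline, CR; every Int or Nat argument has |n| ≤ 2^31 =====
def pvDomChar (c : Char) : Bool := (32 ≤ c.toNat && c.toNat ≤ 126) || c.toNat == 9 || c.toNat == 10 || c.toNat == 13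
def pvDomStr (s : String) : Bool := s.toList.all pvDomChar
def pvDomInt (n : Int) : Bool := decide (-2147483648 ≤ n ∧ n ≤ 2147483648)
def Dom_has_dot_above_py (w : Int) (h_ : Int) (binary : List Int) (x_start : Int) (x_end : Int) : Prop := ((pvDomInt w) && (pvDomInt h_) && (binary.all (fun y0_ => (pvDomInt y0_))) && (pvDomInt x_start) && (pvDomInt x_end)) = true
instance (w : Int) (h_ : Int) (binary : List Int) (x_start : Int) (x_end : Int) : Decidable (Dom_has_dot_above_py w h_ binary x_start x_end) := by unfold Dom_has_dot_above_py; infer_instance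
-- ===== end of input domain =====

-- B is a different decomposition of A: a single ink-row index list replaces A's bounding-box
-- fold, row-ink list and ink/gap state machine (objective: simpler; equally fast).

-- ===== PORT A =====
-- shared row predicate: 'any(binary[y * w + x] for x in range(x_start, x_end))'
-- (both Python versions contain this generator expression verbatim)
def pvInk (w : Int) (binary : List Int) (x_start : Int) (x_end : Int) (y : Int) : Bool :=
  (PySem.List.pyRange x_start x_end).any (fun x => PySem.List.pyGetD binary (y * w + x) 0 != 0)

-- the body of A's final 'for i in range(...)' loop; state = (returned, in_ink, gap_count, found_first_ink)
def pvStep (s : Bool × Bool × Int × Bool) (b : Bool) : Bool × Bool × Int × Bool :=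
  match s with
  | (ret, in_ink, gap, found) =>
    if ret then (ret, in_ink, gap, found)
    else if b then
      if found && decide (gap ≥ 2) then (true, in_ink, gap, found)
      else (false, true, 0, true)
    else if in_ink then (false, in_ink, gap + 1, found)
    else if found then (false, in_ink, gap + 1, found)
    else (ret, in_ink, gap, found)

def has_dot_above_py (w : Int) (h_ : Int) (binary : List Int) (x_start : Int) (x_end : Int) : Bool :=
  -- tight vertical bounding box
  let bb := (PySem.List.pyRange 0 h_).foldl
    (fun (st : Int × Int) y =>
      if pvInk w binary x_start x_end y then (min st.1 y, max st.2 (y + 1)) else st)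
    (h_, 0)
  if bb.1 ≥ bb.2 then false
  else
    let char_h := bb.2 - bb.1
    let row_has_ink := (PySem.List.pyRange bb.1 bb.2).foldl
      (fun acc y => acc ++ [pvInk w binary x_start x_end y]) ([] : List Bool)
    -- int(char_h * 0.6): exact as (char_h * 6) // 10 for 0 ≤ char_h ≤ 2^31
    -- (the double 0.6 is below 3/5 by 0.2/2^53; for such char_h the product rounds back)
    let upper_limit := PySem.Int.floordiv (char_h * 6) 10
    let res := (PySem.List.pyRange 0 (min upper_limit (PySem.List.len row_has_ink))).foldl
      (fun s i => pvStep s (PySem.List.pyGetD row_has_ink i false))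
      (false, false, 0, false)
    res.1

-- ===== PORT B =====
def has_dot_above_py_alt (w : Int) (h_ : Int) (binary : List Int) (x_start : Int) (x_end : Int) : Bool :=
  let inked := (PySem.List.pyRange 0 h_).filter (fun y => pvInk w binary x_start x_end y)
  match inked with
  | [] => false
  | y0 :: rest =>
    let y_max := (y0 :: rest).getLastD 0 + 1
    let limit := y0 + PySem.Int.floordiv ((y_max - y0) * 6) 10
    let upper := (y0 :: rest).filter (fun y => y < limit)
    (upper.zip upper.tail).any (fun p => decide (p.2 - p.1 ≥ 3))

-- ===== PRECONDITION & SPEC =====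
-- Pre_ excludes inputs whose pixel lookups leave [0, len(binary)) (negative height with a
-- non-empty column range, or out-of-range corner indices): there A either raises IndexError
-- or returns a value that is an artefact of Python's negative-index wraparound (or of
-- 'break'/'any' short-circuiting past an invalid index).
def Pre_has_dot_above_py (w : Int) (h_ : Int) (binary : List Int) (x_start : Int) (x_end : Int) : Prop :=
  x_end ≤ x_start ∨ (0 ≤ h_ ∧ (h_ = 0 ∨
    (0 ≤ min 0 ((h_ - 1) * w) + x_start ∧ max 0 ((h_ - 1) * w) + (x_end - 1) < (binary.length : Int))))
instance (w : Int) (h_ : Int) (binary : List Int) (x_start : Int) (x_end : Int) : Decidable (Pre_has_dot_above_py w h_ binary x_start x_end) := by unfold Pre_has_dot_above_py; infer_instance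

def pvWitness_has_dot_above_py : Int × Int × List Int × Int × Int := (1, 7, [1, 0, 0, 1, 0, 0, 0], 0, 1)

def Spec_has_dot_above_py (w : Int) (h_ : Int) (binary : List Int) (x_start : Int) (x_end : Int) (out : Bool) : Prop := out = has_dot_above_py_alt w h_ binary x_start x_end
instance (w : Int) (h_ : Int) (binary : List Int) (x_start : Int) (x_end : Int) (out : Bool) : Decidable (Spec_has_dot_above_py w h_ binary x_start x_end out) := by unfold Spec_has_dot_above_py; infer_instance

-- ===== CLAIM (what is proved, stated in full; the proofs are below) =====
def Claim_equal_has_dot_above_py : Prop := ∀ (w : Int) (h_ : Int) (binary : List Int) (x_start : Int) (x_end : Int), Dom_has_dot_above_py w h_ binary x_start x_end → Pre_has_dot_above_py w h_ binary x_start x_end → Spec_has_dot_above_py w h_ binary x_start x_end (has_dot_above_py w h_ binary x_start x_end)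

-- ===== LEMMAS AND PROOFS =====

-- positions (offset by k) of the 'true' entries of a list of row flags
def pvTrues : List Bool → Int → List Int
  | [], _ => []
  | b :: bs, k => if b then k :: pvTrues bs (k + 1) else pvTrues bs (k + 1)

-- B's final test: some adjacent pair of ink rows is ≥ 3 apart
def pvAdj (l : List Int) : Bool := (l.zip l.tail).any (fun p => decide (p.2 - p.1 ≥ 3))

-- A's gap state machine, written as a recursion
def pvRuns : List Bool → Bool → Int → Bool
  | [], _, _ => false
  | b :: bs, found, gap =>
    if b then ((found && decide (gap ≥ 2)) || pvRuns bs true 0)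
    else pvRuns bs found (gap + if found then 1 else 0)


-- ---- generic facts about pyRange ----

theorem pvRange_pairwise (a b : Int) : (PySem.List.pyRange a b).Pairwise (· < ·) := by
  rw [PySem.List.pyRange_of_pos a b one_pos]
  exact List.Pairwise.map _ (fun x y hxy => by omega) (List.pairwise_lt_range)

theorem pvRange_length (a b : Int) : (PySem.List.pyRange a b).length = (b - a).toNat := by
  rw [PySem.List.pyRange_of_pos a b one_pos]
  simp only [List.length_map, List.length_range]
  split_ifs with h <;> omega

theorem pvTakeRange (a b : Int) (k : Nat) (h : a + k ≤ b) :
    (PySem.List.pyRange a b).take k = PySem.List.pyRange a (a + k) := by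
  rw [PySem.List.pyRange_of_pos a b one_pos, PySem.List.pyRange_of_pos a (a + k) one_pos,
    ← List.map_take, List.take_range]
  congr 1
  split_ifs with h1 h2 <;> simp_all <;> first
  | omega
  | (congr 1; omega)

theorem pvMapGet {α : Type} (xs : List α) (d : α) (n : Int) (h1 : n ≤ (xs.length : Int)) :
    (PySem.List.pyRange 0 n).map (fun j => PySem.List.pyGetD xs j d) = xs.take n.toNat := by
  apply List.ext_getElem
  · simp
    omega
  · intro i hi hi'
    have hr : i < (PySem.List.pyRange 0 n).length := by simpa using hi
    have hrl : (PySem.List.pyRange 0 n)[i] = (i : Int) := by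
      rw [List.getElem_of_eq (PySem.List.pyRange_of_pos 0 n one_pos) hr]
      simp
    have hlen : i < xs.length := by
      have := pvRange_length 0 n
      omega
    simp only [List.getElem_map, hrl, List.getElem_take]
    rw [PySem.List.pyGetD_eq_getElem xs d (by omega) (by exact_mod_cast hlen)]
    simp

-- ---- sorted-list helpers ----

theorem pvHead_le_getLastD (y0 : Int) (rest : List Int) (h : (y0 :: rest).Pairwise (· < ·)) :
    y0 ≤ (y0 :: rest).getLastD 0 := by
  induction rest generalizing y0 with
  | nil => simp
  | cons y1 r ih =>
    have h1 : y0 < y1 := (List.pairwise_cons.mp h).1 y1 (by simp)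
    have := ih y1 (List.pairwise_cons.mp h).2
    simpa using le_trans h1.le this

theorem pvFoldlMin (rest : List Int) (c : Int) (h : ∀ y ∈ rest, c ≤ y) : rest.foldl min c = c := by
  induction rest with
  | nil => rfl
  | cons y r ih =>
    have hc : min c y = c := min_eq_left (h y (by simp))
    simp only [List.foldl_cons, hc]
    exact ih (fun z hz => h z (by simp [hz]))

theorem pvFoldlMax (rest : List Int) (y0 b : Int) (h : (y0 :: rest).Pairwise (· < ·)) :
    (y0 :: rest).foldl (fun m y => max m (y + 1)) b = max b ((y0 :: rest).getLastD 0 + 1) := by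
  induction rest generalizing y0 b with
  | nil => simp
  | cons y1 r ih =>
    have hp := List.pairwise_cons.mp h
    have h1 : y0 < y1 := hp.1 y1 (by simp)
    have hle : y0 + 1 ≤ (y1 :: r).getLastD 0 + 1 := by
      have := pvHead_le_getLastD y1 r hp.2
      omega
    have := ih y1 (max b (y0 + 1)) hp.2
    simp only [List.foldl_cons] at this ⊢
    rw [this, max_assoc, max_eq_right hle]
    simp

-- A's bounding-box fold on the (sorted) list of ink rows
theorem pvBB (y0 : Int) (rest : List Int) (a : Int)
    (hs : (y0 :: rest).Pairwise (· < ·)) (hy : y0 ≤ a) (h0 : 0 ≤ y0) :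
    (y0 :: rest).foldl (fun (st : Int × Int) y => (min st.1 y, max st.2 (y + 1))) (a, 0)
      = (y0, (y0 :: rest).getLastD 0 + 1) := by
  rw [PySem.List.foldl_prod_mk (f := fun m y => min m y) (g := fun m y => max m (y + 1))]
  have hmin : (y0 :: rest).foldl min a = y0 := by
    simp only [List.foldl_cons]
    rw [min_eq_right hy]
    exact pvFoldlMin rest y0 (fun z hz => ((List.pairwise_cons.mp hs).1 z hz).le)
  have hmax := pvFoldlMax rest y0 0 hs
  rw [hmin, hmax, max_eq_right]
  have := pvHead_le_getLastD y0 rest hs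
  omega

-- ---- the gap machine vs the adjacent-difference test ----

theorem pvStep_sticky (bs : List Bool) (s : Bool × Bool × Int × Bool) (h : s.1 = true) :
    bs.foldl pvStep s = s := by
  induction bs with
  | nil => rfl
  | cons b bs ih =>
    obtain ⟨r, i, g, f⟩ := s
    simp only [] at h
    subst h
    simpa [List.foldl_cons, pvStep] using ih

theorem pvFold_runs (bs : List Bool) : ∀ (found : Bool) (gap : Int),
    (bs.foldl pvStep (false, found, gap, found)).1 = pvRuns bs found gap := by
  induction bs with
  | nil => intro found gap; rfl
  | cons b bs ih =>
    intro found gap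
    cases b
    · cases found
      · simpa [List.foldl_cons, pvStep, pvRuns] using ih false gap
      · simpa [List.foldl_cons, pvStep, pvRuns] using ih true (gap + 1)
    · by_cases hg : (found && decide (gap ≥ 2)) = true
      · have hstep : pvStep (false, found, gap, found) true = (true, found, gap, found) := by
          simp [pvStep, hg]
        rw [List.foldl_cons, hstep, pvStep_sticky bs (true, found, gap, found) rfl]
        simp [pvRuns, hg]
      · have hstep : pvStep (false, found, gap, found) true = (false, true, 0, true) := by
          simp [pvStep, hg]
        rw [List.foldl_cons, hstep]
        simp [pvRuns, hg, ih true 0]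

theorem pvTrues_shift (bs : List Bool) : ∀ k : Int, pvTrues bs k = (pvTrues bs 0).map (· + k) := by
  induction bs with
  | nil => intro k; rfl
  | cons b bs ih =>
    intro k
    have tail : pvTrues bs (k + 1) = (pvTrues bs 1).map (· + k) := by
      rw [ih (k + 1), ih 1, List.map_map]
      congr 1
      funext x
      simp [Function.comp]
      ring
    cases b <;> simp [pvTrues, tail]

theorem pvAdj_cons_cons (a b : Int) (l : List Int) :
    pvAdj (a :: b :: l) = (decide (b - a ≥ 3) || pvAdj (b :: l)) := by
  simp [pvAdj]

theorem pvAdj_shift (l : List Int) (c : Int) : pvAdj (l.map (· + c)) = pvAdj l := by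
  unfold pvAdj
  rw [← List.map_tail, List.zip_map, List.any_map]
  apply PySem.List.any_congr_mem
  intro x _
  simp only [Function.comp, Prod.map]
  rw [decide_eq_decide]
  omega

theorem pvRuns_spec (bs : List Bool) : ∀ (found : Bool) (gap : Int),
    pvRuns bs found gap =
      (match pvTrues bs 0 with
       | [] => false
       | t :: ts => (found && decide (gap + t ≥ 2)) || pvAdj (t :: ts)) := by
  induction bs with
  | nil => intro found gap; rfl
  | cons b bs ih =>
    intro found gap
    cases b
    · -- white row
      have lhs : pvRuns (false :: bs) found gap = pvRuns bs found (gap + if found then 1 else 0) := by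
        simp [pvRuns]
      have hts : pvTrues (false :: bs) 0 = (pvTrues bs 0).map (· + 1) := by
        simp [pvTrues, pvTrues_shift bs 1]
      rw [lhs, ih, hts]
      cases hbs : pvTrues bs 0 with
      | nil => simp
      | cons t ts =>
        simp only [List.map_cons]
        have hadj : pvAdj ((t + 1) :: ts.map (· + 1)) = pvAdj (t :: ts) := by
          have := pvAdj_shift (t :: ts) 1
          simpa using this
        rw [hadj]
        cases found
        · simp
        · simp only [Bool.true_and, if_true]
          congr 1
          rw [decide_eq_decide]
          omega
    · -- ink row
      have lhs : pvRuns (true :: bs) found gap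
          = ((found && decide (gap ≥ 2)) || pvRuns bs true 0) := by
        simp [pvRuns]
      have hts : pvTrues (true :: bs) 0 = 0 :: (pvTrues bs 0).map (· + 1) := by
        simp [pvTrues, pvTrues_shift bs 1]
      rw [lhs, ih, hts]
      cases hbs : pvTrues bs 0 with
      | nil => simp [pvAdj]
      | cons t ts =>
        simp only [List.map_cons]
        rw [pvAdj_cons_cons]
        have hadj : pvAdj ((t + 1) :: ts.map (· + 1)) = pvAdj (t :: ts) := by
          simpa using pvAdj_shift (t :: ts) 1
        rw [hadj]
        have hd : decide ((0:Int) + t ≥ 2) = decide (t + 1 - 0 ≥ 3) := by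
          rw [decide_eq_decide]; omega
        simp only [Bool.true_and, hd]
        cases found <;> cases hdec : decide (t + 1 - 0 ≥ 3) <;>
          simp [Bool.or_comm]

-- positions of trues of R over a range = the range filtered by R
theorem pvTrues_map_range (R : Int → Bool) (a b : Int) :
    pvTrues ((PySem.List.pyRange a b).map R) a = (PySem.List.pyRange a b).filter R := by
  by_cases hab : a < b
  · rw [PySem.List.pyRange_one_cons hab]
    simp only [List.map_cons, List.filter_cons]
    have ih := pvTrues_map_range R (a + 1) b
    cases hR : R a <;> simp [pvTrues, ih]
  · have hnil : PySem.List.pyRange a b = [] := by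
      rw [PySem.List.pyRange_of_pos a b one_pos, if_neg hab]
      simp
    simp [hnil, pvTrues]
termination_by (b - a).toNat
decreasing_by
  simp_wf
  omega

-- restricting the ink rows to the upper region, two ways
theorem pvFilter_range_split (R : Int → Bool) (h_ y_min limit : Int)
    (h0 : 0 ≤ y_min) (h1 : y_min ≤ limit) (h2 : limit ≤ h_)
    (hmin : ∀ y, 0 ≤ y → y < y_min → R y = false) :
    (PySem.List.pyRange 0 h_).filter (fun y => R y && decide (y < limit))
      = (PySem.List.pyRange y_min limit).filter R := by
  rw [PySem.List.pyRange_one_append 0 y_min h_ h0 (le_trans h1 h2),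
    PySem.List.pyRange_one_append y_min limit h_ h1 h2]
  simp only [List.filter_append]
  have e1 : (PySem.List.pyRange 0 y_min).filter (fun y => R y && decide (y < limit)) = [] := by
    rw [List.filter_eq_nil_iff]
    intro y hy
    have hb := PySem.List.mem_pyRange_one.mp hy
    simp [hmin y hb.1 hb.2]
  have e3 : (PySem.List.pyRange limit h_).filter (fun y => R y && decide (y < limit)) = [] := by
    rw [List.filter_eq_nil_iff]
    intro y hy
    have hb := PySem.List.mem_pyRange_one.mp hy
    simp
    intro _
    omega
  have e2 : (PySem.List.pyRange y_min limit).filter (fun y => R y && decide (y < limit))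
      = (PySem.List.pyRange y_min limit).filter R := by
    apply List.filter_congr
    intro y hy
    have hb := PySem.List.mem_pyRange_one.mp hy
    simp [hb.2]
  rw [e1, e2, e3]
  simp

theorem pvLen_eq {α : Type} (xs : List α) : PySem.List.len xs = (xs.length : Int) := by
  simp [PySem.List.len]

theorem pvGetLastD_mem (y0 : Int) (rest : List Int) : (y0 :: rest).getLastD 0 ∈ (y0 :: rest) := by
  induction rest generalizing y0 with
  | nil => simp
  | cons y1 r ih => simpa using Or.inr (ih y1)

theorem pvHead_min (y0 : Int) (rest : List Int) (h : (y0 :: rest).Pairwise (· < ·)) :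
    ∀ y ∈ y0 :: rest, y0 ≤ y := by
  intro y hy
  rcases List.mem_cons.mp hy with rfl | hy
  · exact le_refl y
  · exact ((List.pairwise_cons.mp h).1 y hy).le

theorem pvWitness_ok :
    Dom_has_dot_above_py pvWitness_has_dot_above_py.1 pvWitness_has_dot_above_py.2.1
      pvWitness_has_dot_above_py.2.2.1 pvWitness_has_dot_above_py.2.2.2.1
      pvWitness_has_dot_above_py.2.2.2.2 ∧
    Pre_has_dot_above_py pvWitness_has_dot_above_py.1 pvWitness_has_dot_above_py.2.1
      pvWitness_has_dot_above_py.2.2.1 pvWitness_has_dot_above_py.2.2.2.1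
      pvWitness_has_dot_above_py.2.2.2.2 := by
  constructor <;> decide

theorem pvGetD_false (l : List Bool) (hl : ∀ b ∈ l, b = false) (i : Int) :
    PySem.List.pyGetD l i false = false := by
  unfold PySem.List.pyGetD PySem.List.pyGet?
  cases h : PySem.List.pyIdx? l.length i with
  | none => rfl
  | some k =>
    simp only [Option.bind_some]
    cases hk : l[k]? with
    | none => rfl
    | some b =>
      simp only [Option.getD_some]
      exact hl b (List.mem_of_getElem? hk)

theorem pvFoldFalse (g : Int → Bool) (hg : ∀ i, g i = false) (l : List Int) :
    l.foldl (fun s i => pvStep s (g i)) (false, false, 0, false) = (false, false, 0, false) := by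
  induction l with
  | nil => rfl
  | cons i l ih =>
    rw [List.foldl_cons, hg i]
    exact ih

-- A = B when no column is scanned at all (empty column range, height negative)
theorem pvEmptyCols (w : Int) (h_ : Int) (binary : List Int) (x_start : Int) (x_end : Int)
    (hxe : x_end ≤ x_start) (hneg : h_ < 0) :
    has_dot_above_py w h_ binary x_start x_end = has_dot_above_py_alt w h_ binary x_start x_end := by
  have hrange : PySem.List.pyRange x_start x_end = [] := by
    rw [PySem.List.pyRange_of_pos _ _ one_pos, if_neg (by omega)]
    simp
  have hR : ∀ y, pvInk w binary x_start x_end y = false := by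
    intro y
    unfold pvInk
    rw [hrange]
    rfl
  simp only [has_dot_above_py, has_dot_above_py_alt, hR, Bool.false_eq_true, if_false,
    PySem.List.foldl_ignore, List.filter_false]
  rw [if_neg (by simp; omega)]
  rw [PySem.List.foldl_append_singleton_eq_map (f := fun _ => false), List.nil_append]
  rw [pvFoldFalse (fun i => PySem.List.pyGetD
        (List.map (fun _ => (false : Bool)) (PySem.List.pyRange h_ 0)) i false)
      (fun i => pvGetD_false _ (by simp) i)]

-- the main case: the image is scanned top-to-bottom (0 ≤ h)
theorem pvMainPos (w : Int) (h_ : Int) (binary : List Int) (x_start : Int) (x_end : Int)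
    (hh : 0 ≤ h_) :
    has_dot_above_py w h_ binary x_start x_end = has_dot_above_py_alt w h_ binary x_start x_end := by
  simp only [has_dot_above_py, has_dot_above_py_alt]
  rw [PySem.List.foldl_if_eq_foldl_filter
    (p := fun y => pvInk w binary x_start x_end y)
    (f := fun (st : Int × Int) y => (min st.1 y, max st.2 (y + 1)))]
  cases hi : (PySem.List.pyRange 0 h_).filter (fun y => pvInk w binary x_start x_end y) with
  | nil =>
    simp [hh]
  | cons y0 rest =>
    -- the ink rows, sorted strictly increasing, all in [0, h_)
    have hs : (y0 :: rest).Pairwise (· < ·) := by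
      rw [← hi]; exact (pvRange_pairwise 0 h_).filter _
    have hmem : ∀ y ∈ y0 :: rest, (0 ≤ y ∧ y < h_) ∧ pvInk w binary x_start x_end y = true := by
      intro y hy
      rw [← hi] at hy
      have := List.mem_filter.mp hy
      exact ⟨PySem.List.mem_pyRange_one.mp this.1, this.2⟩
    obtain ⟨⟨hy00, hy0h⟩, -⟩ := hmem y0 (by simp)
    set last := (y0 :: rest).getLastD 0 with hlastdef
    have hlmem := pvGetLastD_mem y0 rest
    have hy0last : y0 ≤ last := pvHead_le_getLastD y0 rest hs
    have hlasth : last < h_ := (hmem last hlmem).1.2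
    rw [pvBB y0 rest h_ hs hy0h.le hy00]
    rw [if_neg (by simp only [← hlastdef]; simp; omega)]
    rw [PySem.List.foldl_append_singleton_eq_map (f := fun y => pvInk w binary x_start x_end y)]
    simp only [← hlastdef, List.nil_append]
    set c : Int := last + 1 - y0 with hcdef
    have hc1 : 1 ≤ c := by omega
    set u : Int := PySem.Int.floordiv (c * 6) 10 with hudef
    have hu0 : 0 ≤ u := by
      rw [hudef]
      exact (PySem.Int.le_floordiv_iff_mul_le (by norm_num)).mpr (by omega)
    have huc : u ≤ c := by
      have := (PySem.Int.floordiv_lt_iff_lt_mul (a := c * 6) (b := 10) (q := c + 1)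
        (by norm_num)).mpr (by omega)
      omega
    have hlen : PySem.List.len
        (List.map (fun y => pvInk w binary x_start x_end y) (PySem.List.pyRange y0 (last + 1)))
        = c := by
      rw [pvLen_eq, List.length_map, pvRange_length]
      omega
    rw [hlen, min_eq_left huc]
    rw [← List.foldl_map
      (f := fun j => PySem.List.pyGetD
        (List.map (fun y => pvInk w binary x_start x_end y) (PySem.List.pyRange y0 (last + 1))) j false)
      (g := pvStep)]
    rw [pvMapGet _ false u (by rw [← pvLen_eq, hlen]; exact huc)]
    rw [← List.map_take, pvTakeRange y0 (last + 1) u.toNat (by omega)]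
    have hend : y0 + (u.toNat : Int) = y0 + u := by omega
    rw [hend, pvFold_runs]
    have hmatch : pvRuns ((PySem.List.pyRange y0 (y0 + u)).map (fun y => pvInk w binary x_start x_end y)) false 0
        = pvAdj (pvTrues ((PySem.List.pyRange y0 (y0 + u)).map (fun y => pvInk w binary x_start x_end y)) 0) := by
      rw [pvRuns_spec]
      cases pvTrues ((PySem.List.pyRange y0 (y0 + u)).map (fun y => pvInk w binary x_start x_end y)) 0 <;>
        simp [pvAdj]
    rw [hmatch, ← pvAdj_shift (pvTrues ((PySem.List.pyRange y0 (y0 + u)).map (fun y => pvInk w binary x_start x_end y)) 0) y0,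
      ← pvTrues_shift, pvTrues_map_range]
    have hBside : (y0 :: rest).filter (fun y => decide (y < y0 + u))
        = (PySem.List.pyRange y0 (y0 + u)).filter (fun y => pvInk w binary x_start x_end y) := by
      rw [← hi, List.filter_filter]
      have hcomm : ∀ y ∈ PySem.List.pyRange 0 h_,
          (decide (y < y0 + u) && pvInk w binary x_start x_end y)
            = (pvInk w binary x_start x_end y && decide (y < y0 + u)) := by
        intro y _
        exact Bool.and_comm _ _
      rw [List.filter_congr hcomm]
      apply pvFilter_range_split (fun y => pvInk w binary x_start x_end y) h_ y0 (y0 + u) hy00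
        (by omega) (by omega)
      intro y hy0' hyy0
      cases hry : pvInk w binary x_start x_end y
      · rfl
      · exfalso
        have hymem : y ∈ y0 :: rest := by
          rw [← hi]
          exact List.mem_filter.mpr ⟨PySem.List.mem_pyRange_one.mpr ⟨hy0', by omega⟩, hry⟩
        have := pvHead_min y0 rest hs y hymem
        omega
    rw [hBside]
    rfl

-- ===== VERDICT (by name: the statement is the Claim_ definition above) =====
theorem has_dot_above_py_spec : Claim_equal_has_dot_above_py := by
  unfold Claim_equal_has_dot_above_py
  intro w h_ binary x_start x_end _ hpre
  unfold Spec_has_dot_above_py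
  by_cases hh : 0 ≤ h_
  · exact pvMainPos w h_ binary x_start x_end hh
  · rcases hpre with hxe | ⟨hh2, -⟩
    · exact pvEmptyCols w h_ binary x_start x_end hxe (by omega)
    · omega
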